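-- pv_equiv track=rewrite | github.com/maslov-k/hse_algorithms | 8_g_maze.py | maze_options
-- ===== SOURCE A (Python) =====
-- def maze_options(maze, pos):
--     result = []
--
--     cur_i = pos[0]
--     cur_j = pos[1]
--
--     for i in range(cur_i + 1, len(maze)):
--         if maze[i][cur_j] == 1:
--             if i - 1 != cur_i:
--                 result.append((i - 1, cur_j))
--             break
--         elif maze[i][cur_j] == 2:
--             result.append((i, cur_j))
--             break
--
--     for i in range(cur_i - 1, -1, -1):
--         if maze[i][cur_j] == 1:
--             if i + 1 != cur_i:
--                 result.append((i + 1, cur_j))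
--             break
--         elif maze[i][cur_j] == 2:
--             result.append((i, cur_j))
--             break
--
--     for j in range(cur_j + 1, len(maze[0])):
--         if maze[cur_i][j] == 1:
--             if j - 1 != cur_j:
--                 result.append((cur_i, j - 1))
--             break
--         elif maze[cur_i][j] == 2:
--             result.append((cur_i, j))
--             break
--
--     for j in range(cur_j - 1, -1, -1):
--         if maze[cur_i][j] == 1:
--             if j + 1 != cur_j:
--                 result.append((cur_i, j + 1))
--             break
--         elif maze[cur_i][j] == 2:
--             result.append((cur_i, j))
--             break
--
--     return result
-- ===== SOURCE B (Python) =====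
-- def maze_options(maze, pos):
--     i0, j0 = pos
--     col = [row[j0] for row in maze]
--     row = maze[i0]
--
--     def blocker_maps(line):
--         # nearest blocking cell (value 1 or 2) after / before each index, one pass each way
--         n = len(line)
--         nxt, prv = [None] * n, [None] * n
--         seen = None
--         for t in range(n - 1, -1, -1):
--             nxt[t] = seen
--             if line[t] in (1, 2):
--                 seen = t
--         seen = None
--         for t in range(n):
--             prv[t] = seen
--             if line[t] in (1, 2):
--                 seen = t
--         return nxt, prv
--
--     def stop(line, k, t):
--         if t is None:
--             return []
--         if line[t] == 2:
--             return [t]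
--         if abs(t - k) > 1:
--             return [t + (1 if t < k else -1)]
--         return []
--
--     cnxt, cprv = blocker_maps(col)
--     rnxt, rprv = blocker_maps(row)
--     return ([(s, j0) for s in stop(col, i0, cnxt[i0])]
--           + [(s, j0) for s in stop(col, i0, cprv[i0])]
--           + [(i0, s) for s in stop(row, j0, rnxt[j0])]
--           + [(i0, s) for s in stop(row, j0, rprv[j0])])
-- ===== Notes on version B (the rewrite author's own statement) =====
-- stated objective: alternative
-- what changed: Instead of A's four outward walks from pos with break, B extracts the row and column through pos, precomputes nearest-blocker index maps for each line in two whole-line passes (right-to-left and left-to-right), and resolves each direction in O(1) from the map entry at pos.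
-- outside the precondition, e.g. on maze_options([[0, 0], [0, 2], [0]], (0, 1)): A returns [(1, 1)], B raises IndexError; on maze_options([[0], [0, 2]], (1, 0)): A returns [], B returns [(1, 1)]; on maze_options([[2], [0]], (-2, -1)): A returns [(0, -1), (-2, 0)], B returns []
import Mathlib
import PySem

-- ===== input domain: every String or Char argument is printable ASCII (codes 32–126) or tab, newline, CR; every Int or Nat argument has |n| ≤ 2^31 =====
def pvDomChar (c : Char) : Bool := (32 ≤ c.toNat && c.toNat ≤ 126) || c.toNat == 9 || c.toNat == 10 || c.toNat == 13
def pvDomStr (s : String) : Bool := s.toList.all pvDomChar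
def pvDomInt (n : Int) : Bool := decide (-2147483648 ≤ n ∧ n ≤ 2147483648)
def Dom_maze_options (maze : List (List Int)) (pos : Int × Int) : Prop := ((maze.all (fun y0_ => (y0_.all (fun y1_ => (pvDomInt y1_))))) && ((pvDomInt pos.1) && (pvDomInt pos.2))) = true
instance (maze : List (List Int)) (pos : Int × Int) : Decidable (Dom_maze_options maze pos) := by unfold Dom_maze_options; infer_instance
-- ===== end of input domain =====

-- B replaces A's four outward walks from pos by precomputed nearest-blocker index maps
-- for the row and column through pos (two whole-line passes each), resolved in O(1) per direction.


-- ===== PORT A =====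
-- cell lookup maze[i][j]; pyGetD is exact on Pre_ (all accessed indices are in range there)
def aCell (maze : List (List Int)) (i j : Int) : Int :=
  PySem.List.pyGetD (PySem.List.pyGetD maze i []) j 0

-- loop `for i in range(cur_i+1, len(maze))` with its breaks
def aDown (maze : List (List Int)) (curI curJ : Int) : List Int → List (Int × Int)
  | [] => []
  | i :: rest =>
    if aCell maze i curJ = 1 then (if i - 1 ≠ curI then [(i - 1, curJ)] else [])
    else if aCell maze i curJ = 2 then [(i, curJ)]
    else aDown maze curI curJ rest

-- loop `for i in range(cur_i-1, -1, -1)`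
def aUp (maze : List (List Int)) (curI curJ : Int) : List Int → List (Int × Int)
  | [] => []
  | i :: rest =>
    if aCell maze i curJ = 1 then (if i + 1 ≠ curI then [(i + 1, curJ)] else [])
    else if aCell maze i curJ = 2 then [(i, curJ)]
    else aUp maze curI curJ rest

-- loop `for j in range(cur_j+1, len(maze[0]))`
def aRight (maze : List (List Int)) (curI curJ : Int) : List Int → List (Int × Int)
  | [] => []
  | j :: rest =>
    if aCell maze curI j = 1 then (if j - 1 ≠ curJ then [(curI, j - 1)] else [])
    else if aCell maze curI j = 2 then [(curI, j)]
    else aRight maze curI curJ rest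

-- loop `for j in range(cur_j-1, -1, -1)`
def aLeft (maze : List (List Int)) (curI curJ : Int) : List Int → List (Int × Int)
  | [] => []
  | j :: rest =>
    if aCell maze curI j = 1 then (if j + 1 ≠ curJ then [(curI, j + 1)] else [])
    else if aCell maze curI j = 2 then [(curI, j)]
    else aLeft maze curI curJ rest

def maze_options (maze : List (List Int)) (pos : Int × Int) : List (Int × Int) :=
  let curI := pos.1
  let curJ := pos.2
  aDown maze curI curJ (PySem.List.pyRange (curI + 1) (maze.length : Int) 1)
  ++ aUp maze curI curJ (PySem.List.pyRange (curI - 1) (-1) (-1))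
  ++ aRight maze curI curJ (PySem.List.pyRange (curJ + 1) ((PySem.List.pyGetD maze 0 []).length : Int) 1)
  ++ aLeft maze curI curJ (PySem.List.pyRange (curJ - 1) (-1) (-1))

-- ===== PORT B =====
-- Source B `for t in range(n-1,-1,-1): nxt[t]=seen; if line[t] in (1,2): seen=t` — right-to-left
-- pass building the nearest-blocker-after map; returns (seen, the slots t0.. of nxt)
def bNxtGo (t0 : Int) : List Int → Option Int × List (Option Int)
  | [] => (none, [])
  | v :: rest =>
    let st := bNxtGo (t0 + 1) rest
    ((if v == 1 || v == 2 then some t0 else st.1), st.1 :: st.2)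

-- Source B `for t in range(n): prv[t]=seen; if line[t] in (1,2): seen=t` — left-to-right pass
def bPrvGo (seen : Option Int) (t0 : Int) : List Int → List (Option Int)
  | [] => []
  | v :: rest => seen :: bPrvGo (if v == 1 || v == 2 then some t0 else seen) (t0 + 1) rest

-- Source B `stop(line, k, t)`
def bStop (line : List Int) (k : Int) : Option Int → List Int
  | none => []
  | some t =>
    if PySem.List.pyGetD line t 0 = 2 then [t]
    else if 1 < (t - k).natAbs then [t + (if t < k then 1 else -1)] else []

def maze_options_alt (maze : List (List Int)) (pos : Int × Int) : List (Int × Int) :=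
  let i0 := pos.1
  let j0 := pos.2
  let col := maze.map (fun r => PySem.List.pyGetD r j0 0)
  let row := PySem.List.pyGetD maze i0 []
  let cnxt := (bNxtGo 0 col).2
  let cprv := bPrvGo none 0 col
  let rnxt := (bNxtGo 0 row).2
  let rprv := bPrvGo none 0 row
  (bStop col i0 (PySem.List.pyGetD cnxt i0 none)).map (fun s => (s, j0))
  ++ (bStop col i0 (PySem.List.pyGetD cprv i0 none)).map (fun s => (s, j0))
  ++ (bStop row j0 (PySem.List.pyGetD rnxt j0 none)).map (fun s => (i0, s))
  ++ (bStop row j0 (PySem.List.pyGetD rprv j0 none)).map (fun s => (i0, s))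

-- ===== PRECONDITION & SPEC =====
-- Pre_ = the inputs this file's claim covers: nonempty maze, pos an in-range Python index
-- pair (wraparound allowed), every row reaching column pos.2, row pos.1 of the same length as
-- row 0, and for a negative pos component the corresponding line free of walls/targets.
-- Excluded but sometimes returning in A: ragged mazes missing column pos.2 or with row pos.1
-- shorter/longer than row 0 (A raises mid-walk unless a wall/target accidentally breaks each
-- loop first; B reads the whole column and its own row), and negative components against a
-- line containing 1/2, where A mixes wraparound cell access with plain index arithmetic — an
-- artefact of its implementation no caller of a maze routine would specify.
def Pre_maze_options (maze : List (List Int)) (pos : Int × Int) : Prop :=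
  maze ≠ [] ∧
  -(maze.length : Int) ≤ pos.1 ∧ pos.1 < (maze.length : Int) ∧
  (∀ row ∈ maze, -(row.length : Int) ≤ pos.2 ∧ pos.2 < (row.length : Int)) ∧
  (PySem.List.pyGetD maze pos.1 []).length = (maze.headI).length ∧
  (0 ≤ pos.1 ∨ (∀ row ∈ maze,
    PySem.List.pyGetD row pos.2 0 ≠ 1 ∧ PySem.List.pyGetD row pos.2 0 ≠ 2)) ∧
  (0 ≤ pos.2 ∨ (∀ v ∈ PySem.List.pyGetD maze pos.1 [], v ≠ 1 ∧ v ≠ 2))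

instance (maze : List (List Int)) (pos : Int × Int) : Decidable (Pre_maze_options maze pos) := by
  unfold Pre_maze_options; infer_instance

def pvWitness_maze_options : List (List Int) × (Int × Int) :=
  ([[0, 0, 1], [0, 0, 0], [2, 0, 0]], (1, 1))

def Spec_maze_options (maze : List (List Int)) (pos : Int × Int) (out : List (Int × Int)) : Prop := out = maze_options_alt maze pos
instance (maze : List (List Int)) (pos : Int × Int) (out : List (Int × Int)) : Decidable (Spec_maze_options maze pos out) := by unfold Spec_maze_options; infer_instance

-- ===== CLAIM (what is proved, stated in full; the proofs are below) =====
def Claim_equal_maze_options : Prop := ∀ (maze : List (List Int)) (pos : Int × Int), Dom_maze_options maze pos → Pre_maze_options maze pos → Spec_maze_options maze pos (maze_options maze pos)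

-- ===== LEMMAS AND PROOFS =====

-- spec view of the right-to-left pass: first blocker index at or after t0
def firstAfter (t0 : Int) : List Int → Option Int
  | [] => none
  | v :: rest => if v == 1 || v == 2 then some t0 else firstAfter (t0 + 1) rest

-- spec view of the left-to-right pass: last blocker index in the processed prefix (else seen)
def lastB (seen : Option Int) (t0 : Int) : List Int → Option Int
  | [] => seen
  | v :: rest => lastB (if v == 1 || v == 2 then some t0 else seen) (t0 + 1) rest

theorem bNxtGo_fst (line : List Int) (t0 : Int) : (bNxtGo t0 line).1 = firstAfter t0 line := by
  induction line generalizing t0 with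
  | nil => rfl
  | cons v rest ih => simp [bNxtGo, firstAfter, ih]

theorem bNxtGo_get (line : List Int) (t0 : Int) (k : Nat) (hk : k < line.length) :
    (bNxtGo t0 line).2.getD k none = firstAfter (t0 + k + 1) (line.drop (k + 1)) := by
  induction line generalizing t0 k with
  | nil => simp at hk
  | cons v rest ih =>
    cases k with
    | zero => simpa [bNxtGo] using bNxtGo_fst rest (t0 + 1)
    | succ k =>
      have h := ih (t0 + 1) k (by simpa using Nat.lt_of_succ_lt_succ hk)
      simp only [bNxtGo, List.drop_succ_cons, List.getD_cons_succ]
      rw [h]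
      congr 1
      push_cast
      ring

theorem bPrvGo_get (line : List Int) (seen : Option Int) (t0 : Int) (k : Nat)
    (hk : k < line.length) :
    (bPrvGo seen t0 line).getD k none = lastB seen t0 (line.take k) := by
  induction line generalizing seen t0 k with
  | nil => simp at hk
  | cons v rest ih =>
    cases k with
    | zero => simp [bPrvGo, lastB]
    | succ k =>
      have h := ih (if v == 1 || v == 2 then some t0 else seen) (t0 + 1) k
        (by simpa using Nat.lt_of_succ_lt_succ hk)
      simpa [bPrvGo, lastB] using h

theorem lastB_append (l : List Int) (seen : Option Int) (t0 v : Int) :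
    lastB seen t0 (l ++ [v])
      = if v == 1 || v == 2 then some (t0 + l.length) else lastB seen t0 l := by
  induction l generalizing seen t0 with
  | nil => simp [lastB]
  | cons w rest ih =>
    simp only [List.cons_append, lastB, ih, List.length_cons]
    congr 2
    push_cast
    ring

theorem cell_col (maze : List (List Int)) (j0 i : Int) :
    PySem.List.pyGetD (maze.map (fun r => PySem.List.pyGetD r j0 0)) i 0 = aCell maze i j0 := by
  have h := PySem.List.pyGetD_map (fun r => PySem.List.pyGetD r j0 0) maze i []
  have h0 : PySem.List.pyGetD ([] : List Int) j0 0 = 0 := by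
    simp [PySem.List.pyGetD, PySem.List.pyGet?]
  rw [aCell, ← h, h0]

theorem down_eq (maze : List (List Int)) (i0 j0 : Int) (s : Int) (hs : i0 < s) (h0 : 0 ≤ s) :
    aDown maze i0 j0 (PySem.List.pyRange s (maze.length : Int) 1)
      = (bStop (maze.map (fun r => PySem.List.pyGetD r j0 0)) i0
          (firstAfter s ((maze.map (fun r => PySem.List.pyGetD r j0 0)).drop s.toNat))).map
          (fun t => (t, j0)) := by
  by_cases h : s < (maze.length : Int)
  · have hsn : s.toNat < (maze.map (fun r => PySem.List.pyGetD r j0 0)).length := by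
      simp only [List.length_map]; omega
    have hget : (maze.map (fun r => PySem.List.pyGetD r j0 0))[s.toNat] = aCell maze s j0 := by
      rw [← PySem.List.pyGetD_eq_getElem _ 0 h0 (by simpa using h), cell_col]
    have hpy := cell_col maze j0 s
    rw [PySem.List.pyRange_one_cons h, List.drop_eq_getElem_cons hsn, hget]
    by_cases h1 : aCell maze s j0 = 1
    · have hnlt : ¬ s < i0 := by omega
      have hc := hpy.trans h1
      simp only [firstAfter, aDown, bStop, h1]
      norm_num [hnlt]
      split_ifs with g1 g2
      all_goals first | rfl | omega
    · by_cases h2 : aCell maze s j0 = 2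
      · have hc := hpy.trans h2
        simp [firstAfter, aDown, bStop, h2, hc]
      · have hrec := down_eq maze i0 j0 (s + 1) (by omega) (by omega)
        have hdrop : (s + 1).toNat = s.toNat + 1 := by omega
        simp only [firstAfter, aDown]
        rw [if_neg h1, if_neg h2, if_neg (by simp [h1, h2]), ← hdrop]
        exact hrec
  · rw [PySem.List.pyRange_one_eq_nil (by omega),
        List.drop_eq_nil_of_le (by simp only [List.length_map]; omega)]
    simp [aDown, firstAfter, bStop]
termination_by ((maze.length : Int) - s).toNat
decreasing_by omega

theorem up_eq (maze : List (List Int)) (i0 j0 : Int) (s : Int)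
    (hlo : -1 ≤ s) (hs : s < i0) (hlt : s < (maze.length : Int)) :
    aUp maze i0 j0 (PySem.List.pyRange s (-1) (-1))
      = (bStop (maze.map (fun r => PySem.List.pyGetD r j0 0)) i0
          (lastB none 0 ((maze.map (fun r => PySem.List.pyGetD r j0 0)).take (s + 1).toNat))).map
          (fun t => (t, j0)) := by
  by_cases h : 0 ≤ s
  · have hsn : s.toNat < (maze.map (fun r => PySem.List.pyGetD r j0 0)).length := by
      simp only [List.length_map]; omega
    have hget : (maze.map (fun r => PySem.List.pyGetD r j0 0))[s.toNat] = aCell maze s j0 := by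
      rw [← PySem.List.pyGetD_eq_getElem _ 0 h (by simpa using hlt), cell_col]
    have hpy := cell_col maze j0 s
    have htake : (maze.map (fun r => PySem.List.pyGetD r j0 0)).take (s + 1).toNat
        = (maze.map (fun r => PySem.List.pyGetD r j0 0)).take s.toNat ++ [aCell maze s j0] := by
      have hh : (s + 1).toNat = s.toNat + 1 := by omega
      rw [hh, List.take_add_one, List.getElem?_eq_getElem hsn, hget]
      rfl
    have hlenTake : ((maze.map (fun r => PySem.List.pyGetD r j0 0)).take s.toNat).length
        = s.toNat := by
      simp only [List.length_take, List.length_map]; omega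
    have hcast : (0 : Int) + s.toNat = s := by omega
    rw [PySem.List.pyRange_neg_one_cons (by omega), htake, lastB_append, hlenTake, hcast]
    by_cases h1 : aCell maze s j0 = 1
    · have hc := hpy.trans h1
      simp only [aUp, bStop, h1]
      norm_num [hs]
      split_ifs with g1 g2
      all_goals first | rfl | omega
    · by_cases h2 : aCell maze s j0 = 2
      · have hc := hpy.trans h2
        simp [aUp, bStop, h2, hc]
      · have hrec := up_eq maze i0 j0 (s - 1) (by omega) (by omega) (by omega)
        have harg : (s - 1 + 1).toNat = s.toNat := by omega
        rw [harg] at hrec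
        simp only [aUp]
        rw [if_neg h1, if_neg h2, if_neg (by simp [h1, h2])]
        exact hrec
  · have hs1 : s = -1 := by omega
    rw [hs1, PySem.List.pyRange_neg_one_eq_nil (by omega)]
    simp [aUp, lastB, bStop]
termination_by (s + 1).toNat
decreasing_by omega

theorem right_eq (maze : List (List Int)) (i0 j0 : Int) (s : Int) (hs : j0 < s) (h0 : 0 ≤ s) :
    aRight maze i0 j0 (PySem.List.pyRange s ((PySem.List.pyGetD maze i0 []).length : Int) 1)
      = (bStop (PySem.List.pyGetD maze i0 []) j0
          (firstAfter s ((PySem.List.pyGetD maze i0 []).drop s.toNat))).map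
          (fun t => (i0, t)) := by
  by_cases h : s < ((PySem.List.pyGetD maze i0 []).length : Int)
  · have hsn : s.toNat < (PySem.List.pyGetD maze i0 []).length := by omega
    have hget : (PySem.List.pyGetD maze i0 [])[s.toNat] = aCell maze i0 s := by
      rw [← PySem.List.pyGetD_eq_getElem _ 0 h0 (by simpa using h)]; rfl
    have hpy : PySem.List.pyGetD (PySem.List.pyGetD maze i0 []) s 0 = aCell maze i0 s := rfl
    rw [PySem.List.pyRange_one_cons h, List.drop_eq_getElem_cons hsn, hget]
    by_cases h1 : aCell maze i0 s = 1
    · have hnlt : ¬ s < j0 := by omega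
      have hc := hpy.trans h1
      simp only [firstAfter, aRight, bStop, h1]
      norm_num [hnlt]
      split_ifs with g1 g2
      all_goals first | rfl | omega
    · by_cases h2 : aCell maze i0 s = 2
      · have hc := hpy.trans h2
        simp [firstAfter, aRight, bStop, h2, hc]
      · have hrec := right_eq maze i0 j0 (s + 1) (by omega) (by omega)
        have hdrop : (s + 1).toNat = s.toNat + 1 := by omega
        simp only [firstAfter, aRight]
        rw [if_neg h1, if_neg h2, if_neg (by simp [h1, h2]), ← hdrop]
        exact hrec
  · rw [PySem.List.pyRange_one_eq_nil (by omega), List.drop_eq_nil_of_le (by omega)]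
    simp [aRight, firstAfter, bStop]
termination_by (((PySem.List.pyGetD maze i0 []).length : Int) - s).toNat
decreasing_by omega

theorem left_eq (maze : List (List Int)) (i0 j0 : Int) (s : Int)
    (hlo : -1 ≤ s) (hs : s < j0) (hlt : s < ((PySem.List.pyGetD maze i0 []).length : Int)) :
    aLeft maze i0 j0 (PySem.List.pyRange s (-1) (-1))
      = (bStop (PySem.List.pyGetD maze i0 []) j0
          (lastB none 0 ((PySem.List.pyGetD maze i0 []).take (s + 1).toNat))).map
          (fun t => (i0, t)) := by
  by_cases h : 0 ≤ s
  · have hsn : s.toNat < (PySem.List.pyGetD maze i0 []).length := by omega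
    have hget : (PySem.List.pyGetD maze i0 [])[s.toNat] = aCell maze i0 s := by
      rw [← PySem.List.pyGetD_eq_getElem _ 0 h (by simpa using hlt)]; rfl
    have hpy : PySem.List.pyGetD (PySem.List.pyGetD maze i0 []) s 0 = aCell maze i0 s := rfl
    have htake : (PySem.List.pyGetD maze i0 []).take (s + 1).toNat
        = (PySem.List.pyGetD maze i0 []).take s.toNat ++ [aCell maze i0 s] := by
      have hh : (s + 1).toNat = s.toNat + 1 := by omega
      rw [hh, List.take_add_one, List.getElem?_eq_getElem hsn, hget]
      rfl
    have hlenTake : ((PySem.List.pyGetD maze i0 []).take s.toNat).length = s.toNat := by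
      simp only [List.length_take]; omega
    have hcast : (0 : Int) + s.toNat = s := by omega
    rw [PySem.List.pyRange_neg_one_cons (by omega), htake, lastB_append, hlenTake, hcast]
    by_cases h1 : aCell maze i0 s = 1
    · have hc := hpy.trans h1
      simp only [aLeft, bStop, h1]
      norm_num [hs]
      split_ifs with g1 g2
      all_goals first | rfl | omega
    · by_cases h2 : aCell maze i0 s = 2
      · have hc := hpy.trans h2
        simp [aLeft, bStop, h2, hc]
      · have hrec := left_eq maze i0 j0 (s - 1) (by omega) (by omega) (by omega)
        have harg : (s - 1 + 1).toNat = s.toNat := by omega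
        rw [harg] at hrec
        simp only [aLeft]
        rw [if_neg h1, if_neg h2, if_neg (by simp [h1, h2])]
        exact hrec
  · have hs1 : s = -1 := by omega
    rw [hs1, PySem.List.pyRange_neg_one_eq_nil (by omega)]
    simp [aLeft, lastB, bStop]
termination_by (s + 1).toNat
decreasing_by omega

-- clean-line facts: a line without walls/targets yields the empty result on both sides
theorem pyGetD_all_none (xs : List (Option Int)) (i : Int)
    (h : ∀ x ∈ xs, x = none) : PySem.List.pyGetD xs i none = none := by
  unfold PySem.List.pyGetD
  cases hx : PySem.List.pyGet? xs i with
  | none => rfl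
  | some x =>
    simpa using h x (PySem.List.mem_of_pyGet?_eq_some _ hx)

theorem line_clean (line : List Int) (h : ∀ v ∈ line, v ≠ 1 ∧ v ≠ 2) (j : Int) :
    PySem.List.pyGetD line j 0 ≠ 1 ∧ PySem.List.pyGetD line j 0 ≠ 2 := by
  unfold PySem.List.pyGetD
  cases hx : PySem.List.pyGet? line j with
  | none => simp
  | some v =>
    simpa using h v (PySem.List.mem_of_pyGet?_eq_some _ hx)

theorem cell_clean (maze : List (List Int)) (j0 : Int)
    (h : ∀ row ∈ maze, PySem.List.pyGetD row j0 0 ≠ 1 ∧ PySem.List.pyGetD row j0 0 ≠ 2)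
    (i : Int) : aCell maze i j0 ≠ 1 ∧ aCell maze i j0 ≠ 2 := by
  unfold aCell
  cases hx : PySem.List.pyGet? maze i with
  | none =>
    rw [PySem.List.pyGetD_of_none _ _ _ hx]
    constructor <;> simp [PySem.List.pyGetD, PySem.List.pyGet?]
  | some r =>
    have hr : PySem.List.pyGetD maze i [] = r := by
      unfold PySem.List.pyGetD
      rw [hx]
      rfl
    rw [hr]
    exact h r (PySem.List.mem_of_pyGet?_eq_some _ hx)

theorem aDown_clean (maze : List (List Int)) (i0 j0 : Int)
    (h : ∀ i : Int, aCell maze i j0 ≠ 1 ∧ aCell maze i j0 ≠ 2) :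
    ∀ l : List Int, aDown maze i0 j0 l = [] := by
  intro l
  induction l with
  | nil => rfl
  | cons i rest ih => simp [aDown, (h i).1, (h i).2, ih]

theorem aUp_clean (maze : List (List Int)) (i0 j0 : Int)
    (h : ∀ i : Int, aCell maze i j0 ≠ 1 ∧ aCell maze i j0 ≠ 2) :
    ∀ l : List Int, aUp maze i0 j0 l = [] := by
  intro l
  induction l with
  | nil => rfl
  | cons i rest ih => simp [aUp, (h i).1, (h i).2, ih]

theorem aRight_clean (maze : List (List Int)) (i0 j0 : Int)
    (h : ∀ j : Int, aCell maze i0 j ≠ 1 ∧ aCell maze i0 j ≠ 2) :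
    ∀ l : List Int, aRight maze i0 j0 l = [] := by
  intro l
  induction l with
  | nil => rfl
  | cons jj rest ih => simp [aRight, (h jj).1, (h jj).2, ih]

theorem aLeft_clean (maze : List (List Int)) (i0 j0 : Int)
    (h : ∀ j : Int, aCell maze i0 j ≠ 1 ∧ aCell maze i0 j ≠ 2) :
    ∀ l : List Int, aLeft maze i0 j0 l = [] := by
  intro l
  induction l with
  | nil => rfl
  | cons jj rest ih => simp [aLeft, (h jj).1, (h jj).2, ih]

theorem bNxtGo_clean (line : List Int) (h : ∀ v ∈ line, v ≠ 1 ∧ v ≠ 2) :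
    ∀ t0 : Int, (bNxtGo t0 line).1 = none ∧ ∀ x ∈ (bNxtGo t0 line).2, x = none := by
  induction line with
  | nil => intro t0; simp [bNxtGo]
  | cons v rest ih =>
    intro t0
    have hv := h v (by simp)
    have ihr := ih (fun w hw => h w (by simp [hw])) (t0 + 1)
    refine ⟨?_, ?_⟩
    · simp [bNxtGo, hv.1, hv.2, ihr.1]
    · intro x hx
      simp only [bNxtGo, List.mem_cons] at hx
      rcases hx with hx | hx
      · rw [hx]; exact ihr.1
      · exact ihr.2 x hx

theorem bPrvGo_clean (line : List Int) (h : ∀ v ∈ line, v ≠ 1 ∧ v ≠ 2) :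
    ∀ t0 : Int, ∀ x ∈ bPrvGo none t0 line, x = none := by
  induction line with
  | nil => intro t0 x hx; simp [bPrvGo] at hx
  | cons v rest ih =>
    intro t0 x hx
    have hv := h v (by simp)
    have hcond : (v == 1 || v == 2) = false := by simp [hv.1, hv.2]
    rw [show bPrvGo none t0 (v :: rest) = none :: bPrvGo none (t0 + 1) rest from by
      simp [bPrvGo, hcond]] at hx
    rcases List.mem_cons.1 hx with hx | hx
    · exact hx
    · exact ih (fun w hw => h w (by simp [hw])) (t0 + 1) x hx

-- ===== VERDICT (by name: the statement is the Claim_ definition above) =====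
theorem maze_options_spec : Claim_equal_maze_options := by
  intro maze pos _ hpre
  obtain ⟨hne, hilo, hi1, hall, hrowlen, hiC, hjC⟩ := hpre
  unfold Spec_maze_options maze_options maze_options_alt
  dsimp only
  have hmem : PySem.List.pyGetD maze pos.1 [] ∈ maze :=
    PySem.List.pyGetD_mem maze [] ⟨hilo, hi1⟩
  have hband := hall _ hmem
  have hhead : PySem.List.pyGetD maze 0 [] = maze.headI := by
    cases maze with
    | nil => exact absurd rfl hne
    | cons a l => rw [PySem.List.pyGetD_zero_cons]; rfl
  have hlenA : ((PySem.List.pyGetD maze 0 []).length : Int)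
      = ((PySem.List.pyGetD maze pos.1 []).length : Int) := by rw [hhead, hrowlen]
  have hcollen : (maze.map (fun r => PySem.List.pyGetD r pos.2 0)).length = maze.length := by
    simp
  have Edown : aDown maze pos.1 pos.2 (PySem.List.pyRange (pos.1 + 1) (maze.length : Int) 1)
      = (bStop (maze.map (fun r => PySem.List.pyGetD r pos.2 0)) pos.1
          (PySem.List.pyGetD (bNxtGo 0 (maze.map (fun r => PySem.List.pyGetD r pos.2 0))).2
            pos.1 none)).map (fun s => (s, pos.2)) := by
    rcases hiC with hi0 | hclean
    · have e1 : PySem.List.pyGetD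
          (bNxtGo 0 (maze.map (fun r => PySem.List.pyGetD r pos.2 0))).2 pos.1 none
          = firstAfter (pos.1 + 1)
              ((maze.map (fun r => PySem.List.pyGetD r pos.2 0)).drop (pos.1 + 1).toNat) := by
        rw [(Int.toNat_of_nonneg hi0).symm, PySem.List.pyGetD_natCast,
            bNxtGo_get _ 0 _ (by rw [hcollen]; omega)]
        congr 1
        all_goals omega
      rw [e1, down_eq maze pos.1 pos.2 (pos.1 + 1) (by omega) (by omega)]
    · have hcolv : ∀ v ∈ maze.map (fun r => PySem.List.pyGetD r pos.2 0), v ≠ 1 ∧ v ≠ 2 := by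
        intro v hv
        rcases List.mem_map.1 hv with ⟨r, hr, rfl⟩
        exact hclean r hr
      rw [pyGetD_all_none _ _ ((bNxtGo_clean _ hcolv 0).2),
          aDown_clean maze pos.1 pos.2 (cell_clean maze pos.2 hclean)]
      rfl
  have Eup : aUp maze pos.1 pos.2 (PySem.List.pyRange (pos.1 - 1) (-1) (-1))
      = (bStop (maze.map (fun r => PySem.List.pyGetD r pos.2 0)) pos.1
          (PySem.List.pyGetD (bPrvGo none 0 (maze.map (fun r => PySem.List.pyGetD r pos.2 0)))
            pos.1 none)).map (fun s => (s, pos.2)) := by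
    rcases hiC with hi0 | hclean
    · have e2 : PySem.List.pyGetD
          (bPrvGo none 0 (maze.map (fun r => PySem.List.pyGetD r pos.2 0))) pos.1 none
          = lastB none 0
              ((maze.map (fun r => PySem.List.pyGetD r pos.2 0)).take pos.1.toNat) := by
        conv_lhs => rw [(Int.toNat_of_nonneg hi0).symm, PySem.List.pyGetD_natCast,
          bPrvGo_get _ none 0 _ (by rw [hcollen]; omega)]
      have hup := up_eq maze pos.1 pos.2 (pos.1 - 1) (by omega) (by omega) (by omega)
      rw [show (pos.1 - 1 + 1).toNat = pos.1.toNat by omega] at hup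
      rw [e2, hup]
    · have hcolv : ∀ v ∈ maze.map (fun r => PySem.List.pyGetD r pos.2 0), v ≠ 1 ∧ v ≠ 2 := by
        intro v hv
        rcases List.mem_map.1 hv with ⟨r, hr, rfl⟩
        exact hclean r hr
      rw [pyGetD_all_none _ _ (bPrvGo_clean _ hcolv 0),
          aUp_clean maze pos.1 pos.2 (cell_clean maze pos.2 hclean)]
      rfl
  have Eright : aRight maze pos.1 pos.2
        (PySem.List.pyRange (pos.2 + 1) ((PySem.List.pyGetD maze 0 []).length : Int) 1)
      = (bStop (PySem.List.pyGetD maze pos.1 []) pos.2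
          (PySem.List.pyGetD (bNxtGo 0 (PySem.List.pyGetD maze pos.1 [])).2 pos.2 none)).map
          (fun s => (pos.1, s)) := by
    rw [hlenA]
    rcases hjC with hj0 | hclean
    · have e3 : PySem.List.pyGetD (bNxtGo 0 (PySem.List.pyGetD maze pos.1 [])).2 pos.2 none
          = firstAfter (pos.2 + 1)
              ((PySem.List.pyGetD maze pos.1 []).drop (pos.2 + 1).toNat) := by
        rw [(Int.toNat_of_nonneg hj0).symm, PySem.List.pyGetD_natCast,
            bNxtGo_get _ 0 _ (by omega)]
        congr 1
        all_goals omega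
      rw [e3, right_eq maze pos.1 pos.2 (pos.2 + 1) (by omega) (by omega)]
    · rw [pyGetD_all_none _ _ ((bNxtGo_clean _ hclean 0).2),
          aRight_clean maze pos.1 pos.2 (line_clean _ hclean)]
      rfl
  have Eleft : aLeft maze pos.1 pos.2 (PySem.List.pyRange (pos.2 - 1) (-1) (-1))
      = (bStop (PySem.List.pyGetD maze pos.1 []) pos.2
          (PySem.List.pyGetD (bPrvGo none 0 (PySem.List.pyGetD maze pos.1 [])) pos.2 none)).map
          (fun s => (pos.1, s)) := by
    rcases hjC with hj0 | hclean
    · have e4 : PySem.List.pyGetD (bPrvGo none 0 (PySem.List.pyGetD maze pos.1 [])) pos.2 none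
          = lastB none 0 ((PySem.List.pyGetD maze pos.1 []).take pos.2.toNat) := by
        conv_lhs => rw [(Int.toNat_of_nonneg hj0).symm, PySem.List.pyGetD_natCast,
          bPrvGo_get _ none 0 _ (by omega)]
      have hleft := left_eq maze pos.1 pos.2 (pos.2 - 1) (by omega) (by omega) (by omega)
      rw [show (pos.2 - 1 + 1).toNat = pos.2.toNat by omega] at hleft
      rw [e4, hleft]
    · rw [pyGetD_all_none _ _ (bPrvGo_clean _ hclean 0),
          aLeft_clean maze pos.1 pos.2 (line_clean _ hclean)]
      rfl
  rw [Edown, Eup, Eright, Eleft]
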